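-- pv_equiv track=rewrite | github.com/atgugu/ARC_explorations | Cognitive_Workspace/src/dsl/core_primitives.py | select_touching
-- ===== SOURCE A (Python) =====
-- from typing import List, Tuple, Union, Optional
--
-- Object = List[Tuple[int, int]]
--
-- ObjectSet = List[Object]
--
-- def select_touching(reference: Object, objects: ObjectSet, connectivity: int = 4) -> ObjectSet:
--     """
--     Select objects that touch (are adjacent to) the reference object.
--
--     Args:
--         reference: Reference object
--         objects: Candidate objects
--         connectivity: 4 or 8 connectivity
--
--     Returns:
--         Objects touching the reference
--
--     Example:
--         >>> neighbors = select_touching(obj, all_objects)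
--     """
--     if not reference:
--         return []
--
--     ref_set = set(reference)
--     result = []
--
--     for obj in objects:
--         if obj == reference:
--             continue
--
--         # Check if any pixel of obj is adjacent to any pixel of reference
--         touches = False
--         for r, c in obj:
--             if connectivity == 4:
--                 neighbors = [(r-1, c), (r+1, c), (r, c-1), (r, c+1)]
--             else:  # 8-connectivity
--                 neighbors = [(r+dr, c+dc) for dr in [-1, 0, 1] for dc in [-1, 0, 1] if (dr, dc) != (0, 0)]
--
--             if any(n in ref_set for n in neighbors):
--                 touches = True
--                 break
--
--         if touches:
--             result.append(obj)
--
--     return result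
-- ===== SOURCE B (Python) =====
-- def select_touching(reference, objects, connectivity=4):
--     if not reference:
--         return []
--
--     if connectivity == 4:
--         offs = [(-1, 0), (1, 0), (0, -1), (0, 1)]
--     else:
--         offs = [(-1, -1), (-1, 0), (-1, 1), (0, -1), (0, 1), (1, -1), (1, 0), (1, 1)]
--
--     # Dilate the reference once; a pixel touches the reference iff it lies in the dilation.
--     dilated = set()
--     for r, c in reference:
--         for dr, dc in offs:
--             dilated.add((r + dr, c + dc))
--
--     return [obj for obj in objects
--             if obj != reference and any(p in dilated for p in obj)]
-- ===== Notes on version B (the rewrite author's own statement) =====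
-- stated objective: faster
-- what changed: Instead of generating a neighbor list for every pixel of every candidate object and probing the reference set, B dilates the reference once into a set and tests each candidate pixel with a single membership lookup (valid because the offset sets are symmetric).
import Mathlib
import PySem

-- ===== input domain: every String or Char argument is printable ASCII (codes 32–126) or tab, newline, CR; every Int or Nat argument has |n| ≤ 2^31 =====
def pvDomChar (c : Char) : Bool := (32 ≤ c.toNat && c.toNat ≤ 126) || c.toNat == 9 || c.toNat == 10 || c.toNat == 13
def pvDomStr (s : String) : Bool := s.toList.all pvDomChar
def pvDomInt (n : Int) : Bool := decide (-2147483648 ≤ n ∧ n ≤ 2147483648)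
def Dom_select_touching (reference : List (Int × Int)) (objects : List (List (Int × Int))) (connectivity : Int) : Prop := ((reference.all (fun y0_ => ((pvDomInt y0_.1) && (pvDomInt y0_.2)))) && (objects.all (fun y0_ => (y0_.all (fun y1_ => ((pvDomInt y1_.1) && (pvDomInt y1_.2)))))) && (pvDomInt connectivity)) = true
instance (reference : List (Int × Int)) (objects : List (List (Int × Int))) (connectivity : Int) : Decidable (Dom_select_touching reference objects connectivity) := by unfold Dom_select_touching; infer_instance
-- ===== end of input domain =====

-- ===== PORT A =====
-- B replaces A's per-pixel neighbor generation by a one-time dilation of the reference set (faster by a constant factor; return value only, no mutation).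
def neighbors4A (r c : Int) : List (Int × Int) := [(r-1,c),(r+1,c),(r,c-1),(r,c+1)]

-- [(r+dr, c+dc) for dr in [-1,0,1] for dc in [-1,0,1] if (dr,dc) != (0,0)]
def neighbors8A (r c : Int) : List (Int × Int) :=
  [(-1:Int),0,1].flatMap (fun dr =>
    (([(-1:Int),0,1].filter (fun dc => decide ((dr,dc) ≠ ((0:Int),(0:Int)))))).map
      (fun dc => (r+dr, c+dc)))

def select_touching (reference : List (Int × Int)) (objects : List (List (Int × Int))) (connectivity : Int) : List (List (Int × Int)) :=
  if reference = [] then []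
  else
    let refSet : PySem.Set (Int × Int) := PySem.Set.ofList reference
    objects.foldl (fun result obj =>
      if obj = reference then result
      else
        let touches := obj.any (fun p =>
          (if connectivity = 4 then neighbors4A p.1 p.2 else neighbors8A p.1 p.2).any
            (fun n => refSet.contains n))
        if touches then result ++ [obj] else result) []

-- ===== PORT B =====
def offsB (connectivity : Int) : List (Int × Int) :=
  if connectivity = 4 then [(-1,0),(1,0),(0,-1),(0,1)]
  else [(-1,-1),(-1,0),(-1,1),(0,-1),(0,1),(1,-1),(1,0),(1,1)]

def select_touching_alt (reference : List (Int × Int)) (objects : List (List (Int × Int))) (connectivity : Int) : List (List (Int × Int)) :=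
  if reference = [] then []
  else
    let offs := offsB connectivity
    let dilated : PySem.Set (Int × Int) :=
      reference.foldl (fun s p =>
        offs.foldl (fun s d => PySem.Set.add s (p.1+d.1, p.2+d.2)) s) PySem.Set.empty
    objects.filter (fun obj =>
      decide (obj ≠ reference) && obj.any (fun p => dilated.contains p))

-- ===== PRECONDITION & SPEC =====
def Spec_select_touching (reference : List (Int × Int)) (objects : List (List (Int × Int))) (connectivity : Int) (out : List (List (Int × Int))) : Prop := out = select_touching_alt reference objects connectivity
instance (reference : List (Int × Int)) (objects : List (List (Int × Int))) (connectivity : Int) (out : List (List (Int × Int))) : Decidable (Spec_select_touching reference objects connectivity out) := by unfold Spec_select_touching; infer_instance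

-- ===== CLAIM (what is proved, stated in full; the proofs are below) =====
def Claim_equal_select_touching : Prop := ∀ (reference : List (Int × Int)) (objects : List (List (Int × Int))) (connectivity : Int), Dom_select_touching reference objects connectivity → Spec_select_touching reference objects connectivity (select_touching reference objects connectivity)

-- ===== LEMMAS AND PROOFS =====

-- Set.contains is membership (lists of Int pairs have a lawful BEq).
theorem pv_contains_iff (s : PySem.Set (Int × Int)) (x : Int × Int) :
    s.contains x = true ↔ x ∈ s := by
  simp [PySem.Set.contains]

-- membership in the inner dilation fold (one reference pixel, all offsets)
theorem pv_mem_inner (offs : List (Int × Int)) (p : Int × Int) (s : PySem.Set (Int × Int)) (q : Int × Int) :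
    q ∈ offs.foldl (fun s d => PySem.Set.add s (p.1+d.1, p.2+d.2)) s ↔
      q ∈ s ∨ ∃ d ∈ offs, q = (p.1+d.1, p.2+d.2) := by
  induction offs generalizing s with
  | nil => simp
  | cons d ds ih =>
    simp only [List.foldl_cons, ih, PySem.Set.mem_add, List.mem_cons]
    constructor
    · rintro ((h | rfl) | ⟨d', hd', rfl⟩)
      · exact Or.inl h
      · exact Or.inr ⟨d, Or.inl rfl, rfl⟩
      · exact Or.inr ⟨d', Or.inr hd', rfl⟩
    · rintro (h | ⟨d', (rfl | hd'), rfl⟩)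
      · exact Or.inl (Or.inl h)
      · exact Or.inl (Or.inr rfl)
      · exact Or.inr ⟨d', hd', rfl⟩

-- membership in the full dilation fold
theorem pv_mem_dilated (ref offs : List (Int × Int)) (s : PySem.Set (Int × Int)) (q : Int × Int) :
    q ∈ ref.foldl (fun s p => offs.foldl (fun s d => PySem.Set.add s (p.1+d.1, p.2+d.2)) s) s ↔
      q ∈ s ∨ ∃ p ∈ ref, ∃ d ∈ offs, q = (p.1+d.1, p.2+d.2) := by
  induction ref generalizing s with
  | nil => simp
  | cons p ps ih =>
    simp only [List.foldl_cons, ih, pv_mem_inner, List.mem_cons]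
    constructor
    · rintro ((h | ⟨d, hd, rfl⟩) | ⟨p', hp', hq⟩)
      · exact Or.inl h
      · exact Or.inr ⟨p, Or.inl rfl, d, hd, rfl⟩
      · exact Or.inr ⟨p', Or.inr hp', hq⟩
    · rintro (h | ⟨p', (rfl | hp'), hq⟩)
      · exact Or.inl (Or.inl h)
      · exact Or.inl (Or.inr hq)
      · exact Or.inr ⟨p', hp', hq⟩

-- both offset sets are symmetric under negation
theorem pv_neg_mem_offs (connectivity : Int) (d : Int × Int) (h : d ∈ offsB connectivity) :
    (-d.1, -d.2) ∈ offsB connectivity := by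
  unfold offsB at *
  split at h <;> rename_i hc <;> simp only [hc, if_true, if_false] <;>
    (simp only [List.mem_cons, List.not_mem_nil, or_false] at h ⊢) <;>
    rcases h with rfl | rfl | rfl | rfl | rfl | rfl | rfl | rfl <;> simp

-- A's neighbor list is the offset list shifted to the pixel
theorem pv_neighbors_eq_map (connectivity r c : Int) :
    (if connectivity = 4 then neighbors4A r c else neighbors8A r c) =
      (offsB connectivity).map (fun d => (r+d.1, c+d.2)) := by
  by_cases h : connectivity = 4 <;>
    simp [h, neighbors4A, neighbors8A, offsB, List.flatMap, sub_eq_add_neg]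

-- per-pixel: probing the reference with every neighbor = one lookup in the dilation
theorem pv_touch_eq (connectivity : Int) (reference : List (Int × Int)) (q : Int × Int) :
    ((offsB connectivity).any (fun d =>
        (PySem.Set.ofList reference).contains (q.1+d.1, q.2+d.2))) =
      (reference.foldl (fun s p =>
        (offsB connectivity).foldl (fun s d => PySem.Set.add s (p.1+d.1, p.2+d.2)) s)
        PySem.Set.empty).contains q := by
  rw [Bool.eq_iff_iff]
  simp only [List.any_eq_true, pv_contains_iff, PySem.Set.mem_ofList, pv_mem_dilated,
    PySem.Set.empty, List.not_mem_nil, false_or]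
  constructor
  · rintro ⟨d, hd, hn⟩
    exact ⟨(q.1+d.1, q.2+d.2), hn, (-d.1, -d.2), pv_neg_mem_offs _ d hd, by
      simp⟩
  · rintro ⟨p, hp, d, hd, hq⟩
    refine ⟨(-d.1, -d.2), pv_neg_mem_offs _ d hd, ?_⟩
    have h1 : q.1 = p.1 + d.1 := by rw [hq]
    have h2 : q.2 = p.2 + d.2 := by rw [hq]
    have : (q.1 + -d.1, q.2 + -d.2) = p := by
      simp [h1, h2]
    rwa [this]

-- ===== VERDICT (by name: the statement is the Claim_ definition above) =====
theorem select_touching_spec : Claim_equal_select_touching := by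
  intro reference objects connectivity _
  unfold Spec_select_touching select_touching select_touching_alt
  by_cases hr : reference = []
  · simp [hr]
  · simp only [hr, if_false]
    have hpix : ∀ p : Int × Int,
        ((if connectivity = 4 then neighbors4A p.1 p.2 else neighbors8A p.1 p.2).any
          (fun n => (PySem.Set.ofList reference).contains n)) =
        ((reference.foldl (fun s q => (offsB connectivity).foldl
            (fun s d => PySem.Set.add s (q.1+d.1, q.2+d.2)) s) PySem.Set.empty).contains p) := by
      intro p
      rw [pv_neighbors_eq_map, List.any_map]
      simpa [Function.comp] using pv_touch_eq connectivity reference p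
    have hfun : (fun (result : List (List (Int × Int))) (obj : List (Int × Int)) =>
        if obj = reference then result
        else
          let touches := obj.any (fun p =>
            (if connectivity = 4 then neighbors4A p.1 p.2 else neighbors8A p.1 p.2).any
              (fun n => (PySem.Set.ofList reference).contains n))
          if touches then result ++ [obj] else result) =
        (fun result obj =>
          if ((decide (obj ≠ reference) && obj.any (fun p =>
              (reference.foldl (fun s q => (offsB connectivity).foldl
                (fun s d => PySem.Set.add s (q.1+d.1, q.2+d.2)) s) PySem.Set.empty).contains p))
            = true)
          then result ++ [(fun x => x) obj] else result) := by
      funext result obj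
      by_cases h1 : obj = reference
      · simp [h1]
      · have hd : (decide ¬obj = reference) = true := by simp [h1]
        simp only [hpix, hd, Bool.true_and]
        rw [if_neg h1]
    rw [hfun, PySem.List.foldl_append_if]
    simp
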